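-- pv_equiv track=rewrite | github.com/Wilhelmine21/Wilhelmine21 | Tools/Verilog/ANcodes-GUI/MyDef.py | TestforAllErrorBER
-- ===== SOURCE A (Python) =====
-- def TestforAllErrorBER(bitAN,module,N):
--     ANe_list=[]
--     ebit_list=[]
--     R_list=[]
--     AN=module*N
--     AN2=bin(AN)[2:]
--     AN2_0=AN2.zfill(bitAN)
--     AN2_0List=list(AN2_0)
--     for i in range(bitAN-1,-1,-1): # 0->1
--         AN2_0List_e=AN2_0List.copy()
--         if AN2_0List[i] == '0':
--             AN2_0List_e[i] = '1'
--             ANe2=''.join(AN2_0List_e)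
--             ANe_num=int(ANe2,2)
--             ANe_list.append(ANe_num)
--             ebit_list.append(bitAN-i-1)
--             R_list.append(ANe_num%module)
--     for j in range(bitAN-1,-1,-1): # 1->0
--         AN2_0List_e=AN2_0List.copy()
--         if AN2_0List[j] == '1':
--             AN2_0List_e[j] = '0'
--             ANe2=''.join(AN2_0List_e)
--             ANe_num=int(ANe2,2)
--             ANe_list.append(ANe_num)
--             ebit_list.append(bitAN-j-1)
--             R_list.append(ANe_num%module)
--     return ANe_list,ebit_list,R_list
-- ===== SOURCE B (Python) =====
-- def TestforAllErrorBER(bitAN, module, N):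
--     # Arithmetic bit-flips (no string building): one ascending pass over the bit
--     # positions, residues maintained incrementally from 2^p mod module.
--     AN = module * N
--     if bitAN <= 0:
--         return [], [], []
--     L = max(bitAN, AN.bit_length(), 1)   # length of bin(AN)[2:].zfill(bitAN)
--     zeros_v = []; zeros_e = []; zeros_r = []
--     ones_v = []; ones_e = []; ones_r = []
--     base = AN % module
--     p2 = pow(2, L - bitAN, module)       # 2^p mod module, updated incrementally
--     for e in range(bitAN):
--         p = L - bitAN + e
--         if (AN >> p) & 1:
--             ones_v.append(AN - (1 << p)); ones_e.append(e)
--             ones_r.append((base - p2) % module)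
--         else:
--             zeros_v.append(AN + (1 << p)); zeros_e.append(e)
--             zeros_r.append((base + p2) % module)
--         p2 = (p2 * 2) % module
--     return zeros_v + ones_v, zeros_e + ones_e, zeros_r + ones_r
-- ===== Notes on version B (the rewrite author's own statement) =====
-- stated objective: faster
-- what changed: replaces A's two descending passes that each rebuild the padded binary string (list copy, join, int(.,2) reparse) per bit with one ascending arithmetic pass that flips bit p as AN±2^p and maintains residues incrementally from 2^p mod module, collecting the 0->1 and 1->0 groups in the same pass
-- outside the precondition, e.g. on TestforAllErrorBER(1, -2, 3): A returns ([], [], []), B returns ([-2], [0], [0]); on TestforAllErrorBER(2, 0, 5): A raises ZeroDivisionError, B raises ZeroDivisionError; on TestforAllErrorBER(4, -2, 3): A raises ValueError, B returns ([-5, -2, -8, -14], [0, 2, 1, 3], [-1, 0, 0, 0])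
import Mathlib
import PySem

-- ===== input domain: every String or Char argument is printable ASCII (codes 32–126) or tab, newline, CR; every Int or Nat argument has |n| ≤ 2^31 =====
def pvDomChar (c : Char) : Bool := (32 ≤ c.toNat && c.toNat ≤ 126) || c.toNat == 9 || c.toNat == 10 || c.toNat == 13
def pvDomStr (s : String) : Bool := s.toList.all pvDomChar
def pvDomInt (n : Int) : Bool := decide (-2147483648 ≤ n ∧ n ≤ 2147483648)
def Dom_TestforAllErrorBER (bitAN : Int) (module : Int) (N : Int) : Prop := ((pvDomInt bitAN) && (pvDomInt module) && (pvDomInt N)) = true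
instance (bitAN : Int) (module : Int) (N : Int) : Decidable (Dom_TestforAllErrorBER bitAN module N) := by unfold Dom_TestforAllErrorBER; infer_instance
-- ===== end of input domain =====

-- B replaces A's per-bit string rebuild (copy/join/int-reparse, two descending passes)
-- with one ascending arithmetic pass flipping bit p as AN±2^p and maintaining residues
-- incrementally from 2^p mod module; measured much faster at large bitAN.


-- ===== PORT A =====
-- int(s, 2): exact for the strings A parses under Pre_ (nonempty, only '0'/'1' digits);
-- ported by hand because PySem.Int.ofCharsBase? has no public unfolding lemmas.
def pvInt2 (cs : List Char) : Int :=
  cs.foldl (fun acc c => 2 * acc + (if c = '1' then 1 else 0)) 0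

def TestforAllErrorBER (bitAN : Int) (module : Int) (N : Int) : List Int × List Int × List Int :=
  -- ANe_list=[]; ebit_list=[]; R_list=[]  (the fold state below)
  let AN := module * N
  let AN2 := PySem.List.slice (PySem.Int.toBinChars0b AN) (some 2) none   -- bin(AN)[2:]
  let AN2_0 := PySem.Chars.zfill AN2 bitAN                                -- AN2.zfill(bitAN)
  let AN2_0List := AN2_0
  -- for i in range(bitAN-1,-1,-1): 0->1
  let s1 := (PySem.List.pyRange (bitAN - 1) (-1) (-1)).foldl (fun acc i =>
      if PySem.List.pyGetD AN2_0List i ' ' = '0' then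
        let ANe2 := PySem.List.pySetD AN2_0List i '1'
        let ANe_num := pvInt2 ANe2
        (acc.1 ++ [ANe_num], acc.2.1 ++ [bitAN - i - 1],
         acc.2.2 ++ [PySem.Int.mod ANe_num module])
      else acc) ([], [], [])
  -- for j in range(bitAN-1,-1,-1): 1->0
  let s2 := (PySem.List.pyRange (bitAN - 1) (-1) (-1)).foldl (fun acc j =>
      if PySem.List.pyGetD AN2_0List j ' ' = '1' then
        let ANe2 := PySem.List.pySetD AN2_0List j '0'
        let ANe_num := pvInt2 ANe2
        (acc.1 ++ [ANe_num], acc.2.1 ++ [bitAN - j - 1],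
         acc.2.2 ++ [PySem.Int.mod ANe_num module])
      else acc) s1
  s2

-- ===== PORT B =====
def TestforAllErrorBER_alt (bitAN : Int) (module : Int) (N : Int) : List Int × List Int × List Int :=
  let AN := module * N
  if bitAN ≤ 0 then ([], [], [])
  else
    let L : Int := max bitAN (max (PySem.Int.bitLength AN : Int) 1)
    let base := PySem.Int.mod AN module
    let p2 := PySem.Int.powMod 2 (L - bitAN).toNat module
    -- one ascending pass; state: ((zeros_v, zeros_e, zeros_r), (ones_v, ones_e, ones_r), p2)
    let st := (PySem.List.pyRange 0 bitAN 1).foldl (fun st e =>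
        let p := (L - bitAN + e).toNat        -- nonnegative throughout the loop
        let z := st.1; let o := st.2.1; let p2 := st.2.2
        if PySem.Int.band (AN >>> p) 1 ≠ 0 then
          (z, (o.1 ++ [AN - 1 <<< p], o.2.1 ++ [e],
               o.2.2 ++ [PySem.Int.mod (base - p2) module]),
           PySem.Int.mod (p2 * 2) module)
        else
          ((z.1 ++ [AN + 1 <<< p], z.2.1 ++ [e],
            z.2.2 ++ [PySem.Int.mod (base + p2) module]), o,
           PySem.Int.mod (p2 * 2) module))
      ((([], [], []) : List Int × List Int × List Int),
       (([], [], []) : List Int × List Int × List Int), p2)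
    (st.1.1 ++ st.2.1.1, st.1.2.1 ++ st.2.1.2.1, st.1.2.2 ++ st.2.1.2.2)

-- ===== PRECONDITION & SPEC =====
-- Pre_ excludes inputs with bitAN > 0 on which A raises: module = 0 (ZeroDivisionError)
-- and negative module*N (ValueError parsing the 'b…' of bin()[2:] — except degenerate
-- cases where no flippable char lies among the first bitAN characters and A's empty
-- result is an artefact of the 'b' prefix).
def Pre_TestforAllErrorBER (bitAN : Int) (module : Int) (N : Int) : Prop :=
  bitAN ≤ 0 ∨ (module ≠ 0 ∧ 0 ≤ module * N)
instance (bitAN : Int) (module : Int) (N : Int) : Decidable (Pre_TestforAllErrorBER bitAN module N) := by unfold Pre_TestforAllErrorBER; infer_instance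

def pvWitness_TestforAllErrorBER : Int × Int × Int := (5, 3, 7)

def Spec_TestforAllErrorBER (bitAN : Int) (module : Int) (N : Int) (out : List Int × List Int × List Int) : Prop := out = TestforAllErrorBER_alt bitAN module N
instance (bitAN : Int) (module : Int) (N : Int) (out : List Int × List Int × List Int) : Decidable (Spec_TestforAllErrorBER bitAN module N out) := by unfold Spec_TestforAllErrorBER; infer_instance

-- ===== CLAIM (what is proved, stated in full; the proofs are below) =====
def Claim_equal_TestforAllErrorBER : Prop := ∀ (bitAN : Int) (module : Int) (N : Int), Dom_TestforAllErrorBER bitAN module N → Pre_TestforAllErrorBER bitAN module N → Spec_TestforAllErrorBER bitAN module N (TestforAllErrorBER bitAN module N)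

-- ===== LEMMAS AND PROOFS =====

theorem pv_fmod_add (x y M : Int) :
    Int.fmod (Int.fmod x M + Int.fmod y M) M = Int.fmod (x + y) M := by
  have h1 := Int.fmod_add_mul_fdiv x M
  have h2 := Int.fmod_add_mul_fdiv y M
  have : Int.fmod x M + Int.fmod y M = (x + y) + M * (-(x.fdiv M + y.fdiv M)) := by
    linear_combination h1 + h2
  rw [this, Int.add_mul_fmod_self_left]

theorem pv_fmod_sub (x y M : Int) :
    Int.fmod (Int.fmod x M - Int.fmod y M) M = Int.fmod (x - y) M := by
  have h1 := Int.fmod_add_mul_fdiv x M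
  have h2 := Int.fmod_add_mul_fdiv y M
  have : Int.fmod x M - Int.fmod y M = (x - y) + M * (y.fdiv M - x.fdiv M) := by
    linear_combination h1 - h2
  rw [this, Int.add_mul_fmod_self_left]

theorem pv_fmod_mul2 (x M : Int) :
    Int.fmod (Int.fmod x M * 2) M = Int.fmod (x * 2) M := by
  have h1 := Int.fmod_add_mul_fdiv x M
  have : Int.fmod x M * 2 = (x * 2) + M * (-(2 * x.fdiv M)) := by linear_combination 2 * h1
  rw [this, Int.add_mul_fmod_self_left]

theorem pv_pvInt2_acc (cs : List Char) : ∀ (acc : Int),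
    cs.foldl (fun acc c => 2 * acc + (if c = '1' then 1 else 0)) acc
      = acc * 2 ^ cs.length + pvInt2 cs := by
  induction cs with
  | nil => intro acc; simp [pvInt2]
  | cons c cs ih =>
    intro acc
    simp only [List.foldl_cons, pvInt2, List.length_cons]
    rw [ih, ih (2 * 0 + _)]
    ring

theorem pv_pvInt2_append (xs ys : List Char) :
    pvInt2 (xs ++ ys) = pvInt2 xs * 2 ^ ys.length + pvInt2 ys := by
  unfold pvInt2
  rw [List.foldl_append, pv_pvInt2_acc]
  rfl

theorem pv_pvInt2_replicate (m : Nat) (cs : List Char) :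
    pvInt2 (List.replicate m '0' ++ cs) = pvInt2 cs := by
  rw [pv_pvInt2_append]
  have : pvInt2 (List.replicate m '0') = 0 := by
    induction m with
    | zero => rfl
    | succ k ih => rw [List.replicate_succ]; simp [pvInt2, List.foldl_cons] at ih ⊢; exact ih
  rw [this]; ring

theorem pv_pvInt2_toDigits (a : Nat) : pvInt2 (Nat.toDigits 2 a) = (a : Int) := by
  induction a using Nat.strong_induction_on with
  | _ a ih =>
    by_cases h : a < 2
    · rw [Nat.toDigits_of_lt_base h]
      interval_cases a <;> decide
    · rw [Nat.toDigits_of_base_le (by norm_num) (by omega)]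
      rw [pv_pvInt2_append, ih (a / 2) (by omega)]
      have h2 : a % 2 < 2 := Nat.mod_lt _ (by norm_num)
      have : pvInt2 [(a % 2).digitChar] = ((a % 2 : Nat) : Int) := by
        interval_cases h3 : a % 2 <;> simp_all <;> decide
      simp only [List.length_cons, List.length_nil, this]
      have := Nat.div_add_mod a 2
      push_cast
      omega

theorem pv_toDigits_getElem (a : Nat) : ∀ (t : Nat), t < (Nat.toDigits 2 a).length →
    (Nat.toDigits 2 a)[t]? =
      some (if a / 2 ^ ((Nat.toDigits 2 a).length - 1 - t) % 2 = 1 then '1' else '0') := by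
  induction a using Nat.strong_induction_on with
  | _ a ih =>
    intro t ht
    by_cases h : a < 2
    · rw [Nat.toDigits_of_lt_base h] at ht ⊢
      simp only [List.length_cons, List.length_nil] at ht
      have : t = 0 := by omega
      subst this
      interval_cases a <;> decide
    · rw [Nat.toDigits_of_base_le (by norm_num) (by omega)] at ht ⊢
      set l' := (Nat.toDigits 2 (a / 2)).length with hl'
      by_cases hcase : t < l'
      · rw [List.getElem?_append_left hcase]
        rw [ih (a / 2) (by omega) t hcase]
        have h1 : a / 2 / 2 ^ (l' - 1 - t) = a / 2 ^ (l' - t) := by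
          rw [Nat.div_div_eq_div_mul, ← pow_succ']
          congr 2
          omega
        have h2 : (Nat.toDigits 2 (a / 2) ++ [(a % 2).digitChar]).length - 1 - t = l' - t := by
          simp only [List.length_append, List.length_cons, List.length_nil]
          omega
        rw [h1, h2]
      · have hteq : t = l' := by
          simp only [List.length_append, List.length_cons, List.length_nil] at ht
          omega
        subst hteq
        rw [List.getElem?_append_right (by omega)]
        simp only [List.length_append, List.length_cons, List.length_nil,
          ]
        have hh : (l' + 1 - 1 - l') = 0 := by omega
        rw [hh]
        simp only [pow_zero, Nat.div_one]
        have h2 : a % 2 < 2 := Nat.mod_lt _ (by norm_num)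
        interval_cases h3 : a % 2 <;> simp_all <;> decide


theorem pv_toDigits_lt (a : Nat) : a < 2 ^ (Nat.toDigits 2 a).length := by
  have h := (Nat.length_toDigits_le_iff (b := 2) (n := a)
    (k := (Nat.toDigits 2 a).length) (by norm_num) Nat.length_toDigits_pos).mp le_rfl
  exact h

theorem pv_digs_eq (a : Nat) (n : Int) :
    PySem.Chars.zfill (PySem.List.slice (PySem.Int.toBinChars0b (a : Int)) (some 2) none) n
      = List.replicate ((max n.toNat (Nat.toDigits 2 a).length) - (Nat.toDigits 2 a).length) '0'
          ++ Nat.toDigits 2 a := by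
  have h0 : PySem.Int.toBinChars0b (a : Int) = '0' :: 'b' :: Nat.toDigits 2 a := by
    unfold PySem.Int.toBinChars0b
    rw [if_neg (Int.not_ofNat_neg a), Int.toNat_natCast]
  rw [h0, PySem.List.slice_from _ (by norm_num)]
  show PySem.Chars.zfill (Nat.toDigits 2 a) n = _
  set ds := Nat.toDigits 2 a with hds
  have hpos : 0 < ds.length := Nat.length_toDigits_pos
  have hhead : ds[0]? = some (if a / 2 ^ (ds.length - 1 - 0) % 2 = 1 then '1' else '0') :=
    pv_toDigits_getElem a 0 hpos
  unfold PySem.Chars.zfill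
  by_cases hle : n ≤ (ds.length : Int)
  · rw [if_pos hle]
    have h9 : max n.toNat ds.length - ds.length = 0 := by omega
    rw [h9, List.replicate_zero, List.nil_append]
  · rw [if_neg hle]
    obtain ⟨c, rest, hcr⟩ : ∃ c rest, ds = c :: rest :=
      List.exists_cons_of_ne_nil (List.ne_nil_of_length_pos hpos)
    rw [hcr] at hle ⊢
    have hc : c = '1' ∨ c = '0' := by
      rw [hcr] at hhead
      simp only [List.getElem?_cons_zero, Option.some_inj] at hhead
      split at hhead <;> simp [hhead]
    have hns : ¬ (c = '+' ∨ c = '-') := by rcases hc with h | h <;> simp [h]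
    show (if c = '+' ∨ c = '-' then c :: (List.replicate (n.toNat - (c :: rest).length) '0' ++ rest)
      else List.replicate (n.toNat - (c :: rest).length) '0' ++ c :: rest)
      = List.replicate (max n.toNat (c :: rest).length - (c :: rest).length) '0' ++ c :: rest
    rw [if_neg hns]
    have : max n.toNat (c :: rest).length = n.toNat := by
      simp only [List.length_cons] at hle ⊢
      omega
    rw [this]

theorem pv_len_toDigits_bitLength (a : Nat) (ha : 0 < a) :
    (Nat.toDigits 2 a).length = PySem.Int.bitLength (a : Int) := by
  set l := (Nat.toDigits 2 a).length
  set bl := PySem.Int.bitLength (a : Int) with hbl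
  have h1 : a < 2 ^ bl := by
    have := PySem.Int.lt_two_pow_bitLength (a : Int)
    rwa [Int.natAbs_natCast] at this
  have h2 : 2 ^ (bl - 1) ≤ a := by
    have := PySem.Int.two_pow_bitLength_le (a : Int) (by exact_mod_cast ha.ne')
    rwa [Int.natAbs_natCast] at this
  have hbl0 : 0 < bl := by
    by_contra h
    have : bl = 0 := by omega
    rw [this] at h1; simp at h1; omega
  have hl1 : l ≤ bl := (Nat.length_toDigits_le_iff (by norm_num) hbl0).mpr h1
  have hl0 : 0 < l := Nat.length_toDigits_pos
  have h3 : a < 2 ^ l := pv_toDigits_lt a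
  have : bl ≤ l := by
    by_contra h
    have : l ≤ bl - 1 := by omega
    have := Nat.pow_le_pow_right (n := 2) (by norm_num : 0 < 2) this
    omega
  omega

theorem pv_pvInt2_set (cs : List Char) (j : Nat) (hj : j < cs.length) (c : Char) :
    pvInt2 (cs.set j c) = pvInt2 cs
      + ((if c = '1' then (1:Int) else 0) - (if cs[j] = '1' then 1 else 0)) * 2 ^ (cs.length - 1 - j) := by
  rw [List.set_eq_take_append_cons_drop, if_pos hj]
  have hsplit : cs = cs.take j ++ cs[j] :: cs.drop (j + 1) := by
    conv_lhs => rw [← List.take_append_drop j cs]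
    rw [List.getElem_cons_drop hj]
  have hlen : (cs.drop (j + 1)).length = cs.length - 1 - j := by
    simp; omega
  have hc : ∀ d : Char, pvInt2 (d :: cs.drop (j+1))
      = (if d = '1' then (1:Int) else 0) * 2 ^ (cs.length - 1 - j) + pvInt2 (cs.drop (j+1)) := by
    intro d
    have : (d :: cs.drop (j+1)) = [d] ++ cs.drop (j+1) := rfl
    rw [this, pv_pvInt2_append, hlen]
    congr 2
    simp [pvInt2]
  have e0 : pvInt2 cs = pvInt2 (cs.take j) * 2 ^ (cs[j] :: cs.drop (j+1)).length
      + pvInt2 (cs[j] :: cs.drop (j+1)) := by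
    conv_lhs => rw [hsplit]
    rw [pv_pvInt2_append]
  rw [pv_pvInt2_append, e0, hc, hc]
  simp only [List.length_cons, hlen]
  ring


theorem pv_digs_getElem (a m j : Nat)
    (hj : j < max m (Nat.toDigits 2 a).length) :
    (List.replicate ((max m (Nat.toDigits 2 a).length) - (Nat.toDigits 2 a).length) '0'
      ++ Nat.toDigits 2 a)[j]? =
      some (if a / 2 ^ (max m (Nat.toDigits 2 a).length - 1 - j) % 2 = 1 then '1' else '0') := by
  set l := (Nat.toDigits 2 a).length with hl
  set Ln := max m l with hLn
  by_cases hcase : j < Ln - l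
  · rw [List.getElem?_append_left (by simpa using hcase)]
    rw [List.getElem?_replicate]
    rw [if_pos hcase]
    have hlt : a < 2 ^ (Ln - 1 - j) := by
      calc a < 2 ^ l := pv_toDigits_lt a
      _ ≤ 2 ^ (Ln - 1 - j) := Nat.pow_le_pow_right (by norm_num) (by omega)
    rw [Nat.div_eq_of_lt hlt]
    simp
  · have hge : (List.replicate (Ln - l) '0').length ≤ j := by simpa using (by omega : Ln - l ≤ j)
    have hrl : (List.replicate (Ln - l) '0').length = Ln - l := List.length_replicate
    rw [List.getElem?_append_right hge, hrl]
    rw [pv_toDigits_getElem a (j - (Ln - l)) (by omega)]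
    have hexp : (Nat.toDigits 2 a).length - 1 - (j - (Ln - l)) = Ln - 1 - j := by omega
    rw [hexp]

theorem pv_foldl3 {P : Int → Prop} [DecidablePred P] (f g h : Int → Int) :
    ∀ (l : List Int) (acc : List Int × List Int × List Int),
    l.foldl (fun acc i => if P i then (acc.1 ++ [f i], acc.2.1 ++ [g i], acc.2.2 ++ [h i]) else acc) acc
    = (acc.1 ++ ((l.filter (fun i => decide (P i))).map f),
       acc.2.1 ++ ((l.filter (fun i => decide (P i))).map g),
       acc.2.2 ++ ((l.filter (fun i => decide (P i))).map h)) := by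
  intro l
  induction l with
  | nil => intro acc; simp
  | cons x xs ih =>
    intro acc
    simp only [List.foldl_cons, List.filter_cons]
    by_cases hx : P x
    · simp only [hx, decide_true, ih]
      simp
    · simp only [hx, decide_false, ih]
      simp




theorem pv_L_eq (a n : Nat) (hn : 0 < n) :
    (max (n : Int) (max ((PySem.Int.bitLength ((a : Int))) : Int) 1) : Int)
      = ((max n (Nat.toDigits 2 a).length : Nat) : Int) := by
  by_cases ha : a = 0
  · subst ha
    rw [show ((0:Nat):Int) = (0:Int) by norm_num, PySem.Int.bitLength_zero]
    rw [Nat.toDigits_zero]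
    simp [Nat.cast_max]
  · rw [← pv_len_toDigits_bitLength a (by omega)]
    have h1 : 1 ≤ (Nat.toDigits 2 a).length := Nat.length_toDigits_pos
    rw [Nat.cast_max]
    omega

theorem pv_mapfilter_congr {p q : Nat → Bool} {f g : Nat → Int} (n : Nat)
    (hpq : ∀ k, k < n → p k = q k)
    (hfg : ∀ k, k < n → p k = true → f k = g k) :
    ((List.range n).filter p).map f = ((List.range n).filter q).map g := by
  rw [List.filter_congr (fun x hx => hpq x (List.mem_range.mp hx))]
  apply List.map_congr_left
  intro k hk
  obtain ⟨hk1, hk2⟩ := List.mem_filter.mp hk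
  exact hfg k (List.mem_range.mp hk1) (by rw [hpq k (List.mem_range.mp hk1)]; exact hk2)

def pvNFB (Z O : List Int) (v r v' r' : Int → Int) (p2 : Int) :
    (List Int × List Int × List Int) × (List Int × List Int × List Int) × Int :=
  ((Z.map v, Z.map (fun e => e), Z.map r), (O.map v', O.map (fun e => e), O.map r'), p2)

theorem pv_bloop (a : Nat) (module : Int) (n : Nat) (L : Int) (hL : (n : Int) ≤ L) :
    ∀ (m : Nat), m ≤ n →
    List.foldl
      (fun st e =>
        if PySem.Int.band ((a : Int) >>> (L - (n : Int) + e).toNat) 1 ≠ 0 then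
          (st.1,
            (st.2.1.1 ++ [(a : Int) - ((1 <<< (L - (n : Int) + e).toNat : Nat) : Int)],
              st.2.1.2.1 ++ [e],
              st.2.1.2.2 ++ [PySem.Int.mod (PySem.Int.mod ((a : Int)) module - st.2.2) module]),
            PySem.Int.mod (st.2.2 * 2) module)
        else
          ((st.1.1 ++ [(a : Int) + ((1 <<< (L - (n : Int) + e).toNat : Nat) : Int)],
              st.1.2.1 ++ [e],
              st.1.2.2 ++ [PySem.Int.mod (PySem.Int.mod ((a : Int)) module + st.2.2) module]),
            st.2.1, PySem.Int.mod (st.2.2 * 2) module))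
      ((([], [], []) : List Int × List Int × List Int),
        (([], [], []) : List Int × List Int × List Int),
        PySem.Int.mod (2 ^ (L - (n : Int)).toNat) module)
      (PySem.List.pyRange 0 (m : Int) 1)
    = pvNFB
        ((PySem.List.pyRange 0 (m : Int) 1).filter
          (fun e => !decide (PySem.Int.band ((a : Int) >>> (L - (n : Int) + e).toNat) 1 ≠ 0)))
        ((PySem.List.pyRange 0 (m : Int) 1).filter
          (fun e => decide (PySem.Int.band ((a : Int) >>> (L - (n : Int) + e).toNat) 1 ≠ 0)))
        (fun e => (a : Int) + ((1 <<< (L - (n : Int) + e).toNat : Nat) : Int))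
        (fun e => PySem.Int.mod ((a : Int) + 2 ^ (L - (n : Int) + e).toNat) module)
        (fun e => (a : Int) - ((1 <<< (L - (n : Int) + e).toNat : Nat) : Int))
        (fun e => PySem.Int.mod ((a : Int) - 2 ^ (L - (n : Int) + e).toNat) module)
        (PySem.Int.mod (2 ^ (L - (n : Int) + (m : Int)).toNat) module) := by
  intro m
  induction m with
  | zero =>
    intro _
    rw [show ((0:Nat):Int) = (0:Int) by norm_num]
    rw [PySem.List.pyRange_one_eq_nil le_rfl]
    simp [pvNFB]
  | succ m ih =>
    intro hm
    have hm' : m ≤ n := by omega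
    have hcast : ((m + 1 : Nat) : Int) = (m : Int) + 1 := by push_cast; ring
    rw [hcast, PySem.List.pyRange_one_succ_right (by positivity), List.foldl_append]
    rw [ih hm']
    have hmod2 : PySem.Int.mod (PySem.Int.mod (2 ^ (L - (n:Int) + (m:Int)).toNat) module * 2) module
        = PySem.Int.mod (2 ^ (L - (n:Int) + ((m:Int) + 1)).toNat) module := by
      show Int.fmod (Int.fmod _ _ * 2) _ = _
      rw [pv_fmod_mul2]
      have h9 : (L - (n:Int) + ((m:Int) + 1)).toNat = (L - (n:Int) + (m:Int)).toNat + 1 := by omega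
      rw [h9, pow_succ]
      rfl
    have hsub : PySem.Int.mod (PySem.Int.mod ((a:Int)) module - PySem.Int.mod (2 ^ (L - (n:Int) + (m:Int)).toNat) module) module
        = PySem.Int.mod ((a:Int) - 2 ^ (L - (n:Int) + (m:Int)).toNat) module := by
      show Int.fmod (Int.fmod _ _ - Int.fmod _ _) _ = _
      rw [pv_fmod_sub]
      rfl
    have hadd : PySem.Int.mod (PySem.Int.mod ((a:Int)) module + PySem.Int.mod (2 ^ (L - (n:Int) + (m:Int)).toNat) module) module
        = PySem.Int.mod ((a:Int) + 2 ^ (L - (n:Int) + (m:Int)).toNat) module := by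
      show Int.fmod (Int.fmod _ _ + Int.fmod _ _) _ = _
      rw [pv_fmod_add]
      rfl
    simp only [pvNFB, List.foldl_cons, List.foldl_nil]
    by_cases hc : PySem.Int.band ((a : Int) >>> (L - (n : Int) + (m:Int)).toNat) 1 ≠ 0
    · rw [if_pos hc]
      simp [hc, hsub, hmod2]
    · rw [if_neg hc]
      simp only [ne_eq, not_not] at hc
      simp [hc, hadd, hmod2]


-- shared context facts
theorem pv_digs_len (a m : Nat) :
    (List.replicate ((max m (Nat.toDigits 2 a).length) - (Nat.toDigits 2 a).length) '0'
      ++ Nat.toDigits 2 a).length = max m (Nat.toDigits 2 a).length := by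
  simp only [List.length_append, List.length_replicate]
  omega

theorem pv_digs_getElem' (a m j : Nat) (hj : j < max m (Nat.toDigits 2 a).length) :
    (List.replicate ((max m (Nat.toDigits 2 a).length) - (Nat.toDigits 2 a).length) '0'
      ++ Nat.toDigits 2 a)[j]'(by rw [pv_digs_len]; exact hj) =
      (if a / 2 ^ (max m (Nat.toDigits 2 a).length - 1 - j) % 2 = 1 then '1' else '0') := by
  have h := pv_digs_getElem a m j hj
  rw [List.getElem?_eq_getElem (by rw [pv_digs_len]; exact hj)] at h
  exact Option.some_injective _ h

theorem pv_bit_band (a t : Nat) :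
    PySem.Int.band ((a : Int) >>> t) 1 = ((a / 2 ^ t % 2 : Nat) : Int) := by
  have h1 : ((a : Int) >>> t) = ((a >>> t : Nat) : Int) := rfl
  have h2 : (1 : Int) = ((1 : Nat) : Int) := rfl
  rw [h1, h2, PySem.Int.band_natCast]
  rw [Nat.and_one_is_mod, Nat.shiftRight_eq_div_pow]

theorem pv_cond_iff (a t : Nat) :
    (PySem.Int.band ((a : Int) >>> t) 1 ≠ 0) ↔ a / 2 ^ t % 2 = 1 := by
  rw [pv_bit_band]
  have : a / 2 ^ t % 2 < 2 := Nat.mod_lt _ (by norm_num)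
  omega

theorem pv_pvInt2_digs (a m : Nat) :
    pvInt2 (List.replicate ((max m (Nat.toDigits 2 a).length) - (Nat.toDigits 2 a).length) '0'
      ++ Nat.toDigits 2 a) = (a : Int) := by
  rw [pv_pvInt2_replicate, pv_pvInt2_toDigits]

theorem pv_digs_getD (a m j : Nat) (hj : j < max m (Nat.toDigits 2 a).length) :
    (List.replicate ((max m (Nat.toDigits 2 a).length) - (Nat.toDigits 2 a).length) '0'
      ++ Nat.toDigits 2 a).getD j ' '
      = (if a / 2 ^ (max m (Nat.toDigits 2 a).length - 1 - j) % 2 = 1 then '1' else '0') := by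
  rw [List.getD_eq_getElem?_getD, pv_digs_getElem a m j hj]
  rfl

theorem pv_digs_set (a m j : Nat) (hj : j < max m (Nat.toDigits 2 a).length) (c : Char) :
    pvInt2 ((List.replicate ((max m (Nat.toDigits 2 a).length) - (Nat.toDigits 2 a).length) '0'
        ++ Nat.toDigits 2 a).set j c)
      = (a : Int) + ((if c = '1' then (1:Int) else 0)
          - (if a / 2 ^ (max m (Nat.toDigits 2 a).length - 1 - j) % 2 = 1 then 1 else 0))
          * 2 ^ (max m (Nat.toDigits 2 a).length - 1 - j) := by
  rw [pv_pvInt2_set _ j (by rw [pv_digs_len]; exact hj) c]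
  rw [pv_pvInt2_digs]
  rw [pv_digs_getElem' a m j hj]
  rw [pv_digs_len]
  by_cases hbit : a / 2 ^ (max m (Nat.toDigits 2 a).length - 1 - j) % 2 = 1
  · simp [hbit]
  · simp [hbit]

-- ===== VERDICT (by name: the statement is the Claim_ definition above) =====
theorem TestforAllErrorBER_spec : Claim_equal_TestforAllErrorBER := by
  intro bitAN module N _ hpre
  unfold Spec_TestforAllErrorBER TestforAllErrorBER TestforAllErrorBER_alt
  by_cases hb : bitAN ≤ 0
  · rw [if_pos hb]
    rw [PySem.List.pyRange_neg_one_eq_nil (by omega : bitAN - 1 ≤ -1)]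
    simp
  · rcases hpre with hb' | ⟨hm, h0⟩
    · omega
    obtain ⟨n, hbn⟩ : ∃ n : Nat, bitAN = (n : Int) := ⟨bitAN.toNat, by omega⟩
    obtain ⟨a, hAN⟩ : ∃ a : Nat, module * N = (a : Int) := ⟨(module * N).toNat, by omega⟩
    have hn : 0 < n := by omega
    rw [if_neg hb]
    simp only [hAN, hbn]
    rw [pv_digs_eq a (n : Int)]
    simp only [Int.toNat_natCast]
    rw [pv_L_eq a n hn]
    have hnLn : n ≤ max n (Nat.toDigits 2 a).length := le_max_left _ _
    have hdl := pv_digs_len a n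
    have hgv := pv_digs_getD a n
    have hsetv := pv_digs_set a n
    set Ln := max n (Nat.toDigits 2 a).length with hLndef
    set digs := List.replicate (Ln - (Nat.toDigits 2 a).length) '0' ++ Nat.toDigits 2 a
      with hdigs
    -- A-side folds
    rw [pv_foldl3 (P := fun i => PySem.List.pyGetD digs i ' ' = '0')
      (fun i => pvInt2 (PySem.List.pySetD digs i '1')) (fun i => (n:Int) - i - 1)
      (fun i => PySem.Int.mod (pvInt2 (PySem.List.pySetD digs i '1')) module)]
    rw [pv_foldl3 (P := fun i => PySem.List.pyGetD digs i ' ' = '1')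
      (fun i => pvInt2 (PySem.List.pySetD digs i '0')) (fun i => (n:Int) - i - 1)
      (fun i => PySem.Int.mod (pvInt2 (PySem.List.pySetD digs i '0')) module)]
    simp only [List.nil_append]
    -- B-side fold
    simp only [PySem.Int.powMod]
    rw [pv_bloop a module n ((Ln : Nat) : Int) (by exact_mod_cast hnLn) n le_rfl]
    simp only [pvNFB]
    -- range bridges
    have hdesc : PySem.List.pyRange ((n:Int) - 1) (-1) (-1)
        = (List.range n).map (fun (k : Nat) => (n:Int) - 1 - (k:Int)) := by
      rw [PySem.List.pyRange_neg_one]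
      rw [show ((n:Int) - 1 - -1).toNat = n by omega]
    have hasc : PySem.List.pyRange 0 (n:Int) 1 = (List.range n).map (fun (k : Nat) => (k:Int)) := by
      rw [PySem.List.pyRange_one]
      rw [show ((n:Int) - 0).toNat = n by omega]
      exact List.map_congr_left (fun k _ => by ring)
    rw [hdesc, hasc]
    simp only [List.filter_map, List.map_map]
    -- pointwise facts
    have hgetc : ∀ k : Nat, k < n →
        PySem.List.pyGetD digs ((n:Int) - 1 - (k:Int)) ' '
          = (if a / 2 ^ (Ln - n + k) % 2 = 1 then '1' else '0') := by
      intro k hk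
      rw [show ((n:Int) - 1 - (k:Int)) = ((n - 1 - k : Nat) : Int) by omega]
      rw [PySem.List.pyGetD_natCast]
      rw [hgv (n - 1 - k) (by omega)]
      rw [show Ln - 1 - (n - 1 - k) = Ln - n + k by omega]
    have hcond : ∀ k : Nat, k < n →
        (decide (PySem.List.pyGetD digs ((n:Int) - 1 - (k:Int)) ' ' = '0'))
          = !decide (PySem.Int.band ((a:Int) >>> ((((Ln:Nat):Int) - (n:Int) + (k:Int))).toNat) 1 ≠ 0) := by
      intro k hk
      rw [hgetc k hk, show ((((Ln:Nat):Int) - (n:Int) + (k:Int))).toNat = Ln - n + k by omega]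
      by_cases hbit : a / 2 ^ (Ln - n + k) % 2 = 1
      · simp [hbit, (pv_cond_iff a (Ln - n + k)).mpr hbit]
      · have h2 := (pv_cond_iff a (Ln - n + k)).not.mpr hbit
        simp [hbit, h2]
    have hcond1 : ∀ k : Nat, k < n →
        (decide (PySem.List.pyGetD digs ((n:Int) - 1 - (k:Int)) ' ' = '1'))
          = decide (PySem.Int.band ((a:Int) >>> ((((Ln:Nat):Int) - (n:Int) + (k:Int))).toNat) 1 ≠ 0) := by
      intro k hk
      rw [hgetc k hk, show ((((Ln:Nat):Int) - (n:Int) + (k:Int))).toNat = Ln - n + k by omega]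
      by_cases hbit : a / 2 ^ (Ln - n + k) % 2 = 1
      · simp [hbit, (pv_cond_iff a (Ln - n + k)).mpr hbit]
      · have h2 := (pv_cond_iff a (Ln - n + k)).not.mpr hbit
        simp [hbit, h2]
    have hval0 : ∀ k : Nat, k < n →
        PySem.List.pyGetD digs ((n:Int) - 1 - (k:Int)) ' ' = '0' →
        pvInt2 (PySem.List.pySetD digs ((n:Int) - 1 - (k:Int)) '1')
          = (a : Int) + ((2:Int) ^ (Ln - n + k)) := by
      intro k hk hc
      rw [hgetc k hk] at hc
      have hbit : ¬ (a / 2 ^ (Ln - n + k) % 2 = 1) := by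
        intro hx; rw [if_pos hx] at hc; exact absurd hc (by decide)
      rw [PySem.List.pySetD_of_nonneg digs '1' (by omega)]
      rw [show ((n:Int) - 1 - (k:Int)).toNat = n - 1 - k by omega]
      rw [hsetv (n - 1 - k) (by omega) '1']
      rw [show Ln - 1 - (n - 1 - k) = Ln - n + k by omega]
      rw [if_neg hbit]
      norm_num
    have hval1 : ∀ k : Nat, k < n →
        PySem.List.pyGetD digs ((n:Int) - 1 - (k:Int)) ' ' = '1' →
        pvInt2 (PySem.List.pySetD digs ((n:Int) - 1 - (k:Int)) '0')
          = (a : Int) - ((2:Int) ^ (Ln - n + k)) := by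
      intro k hk hc
      rw [hgetc k hk] at hc
      have hbit : a / 2 ^ (Ln - n + k) % 2 = 1 := by
        by_contra hx; rw [if_neg hx] at hc; exact absurd hc (by decide)
      rw [PySem.List.pySetD_of_nonneg digs '0' (by omega)]
      rw [show ((n:Int) - 1 - (k:Int)).toNat = n - 1 - k by omega]
      rw [hsetv (n - 1 - k) (by omega) '0']
      rw [show Ln - 1 - (n - 1 - k) = Ln - n + k by omega]
      rw [if_pos hbit, if_neg (by decide : ¬ ('0':Char) = '1')]
      ring
    have hshift : ∀ k : Nat, k < n →
        ((1 <<< ((((Ln:Nat):Int) - (n:Int) + (k:Int))).toNat : Nat) : Int) = (2:Int) ^ (Ln - n + k) := by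
      intro k hk
      rw [show ((((Ln:Nat):Int) - (n:Int) + (k:Int))).toNat = Ln - n + k by omega]
      rw [Nat.one_shiftLeft]
      push_cast
      ring
    have hexp : ∀ k : Nat, k < n →
        (2:Int) ^ ((((Ln:Nat):Int) - (n:Int) + (k:Int))).toNat = (2:Int) ^ (Ln - n + k) := by
      intro k hk
      rw [show ((((Ln:Nat):Int) - (n:Int) + (k:Int))).toNat = Ln - n + k by omega]
    -- assemble
    refine Prod.ext ?_ (Prod.ext ?_ ?_)
    · show _ ++ _ = _ ++ _
      congr 1
      · apply pv_mapfilter_congr n (fun k hk => hcond k hk)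
        intro k hk hpk
        simp only [Function.comp_apply] at hpk ⊢
        rw [hval0 k hk (by simpa using hpk), hshift k hk]
      · apply pv_mapfilter_congr n (fun k hk => hcond1 k hk)
        intro k hk hpk
        simp only [Function.comp_apply] at hpk ⊢
        rw [hval1 k hk (by simpa using hpk), hshift k hk]
    · show _ ++ _ = _ ++ _
      congr 1
      · apply pv_mapfilter_congr n (fun k hk => hcond k hk)
        intro k hk _
        simp only [Function.comp_apply]
        omega
      · apply pv_mapfilter_congr n (fun k hk => hcond1 k hk)
        intro k hk _
        simp only [Function.comp_apply]
        omega
    · show _ ++ _ = _ ++ _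
      congr 1
      · apply pv_mapfilter_congr n (fun k hk => hcond k hk)
        intro k hk hpk
        simp only [Function.comp_apply] at hpk ⊢
        rw [hval0 k hk (by simpa using hpk), hexp k hk]
      · apply pv_mapfilter_congr n (fun k hk => hcond1 k hk)
        intro k hk hpk
        simp only [Function.comp_apply] at hpk ⊢
        rw [hval1 k hk (by simpa using hpk), hexp k hk]
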